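-- pv_equiv track=rewrite | github.com/ey242/KiVA | colab_helper_functions/helper_compo.py | extract_earliest_letter
-- ===== SOURCE A (Python) =====
-- def extract_earliest_letter(response_text):
--     letters = ["(A)", "(B)", "(C)", "(D)"]
--     found_letter = None
--     earliest_index = len(response_text)
--
--     for letter in letters:
--         idx = response_text.find(letter)
--         if idx != -1 and idx < earliest_index:
--             earliest_index = idx
--             found_letter = letter
--
--     return found_letter if found_letter else "Null"
-- ===== SOURCE B (Python) =====
-- import re
--
-- _MARKER = re.compile(r'\((A|B|C|D)\)')
--
-- def extract_earliest_letter(response_text):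
--     m = _MARKER.search(response_text)
--     return m.group(0) if m else "Null"
-- ===== Notes on version B (the rewrite author's own statement) =====
-- stated objective: idiomatic
-- what changed: Replaced four separate .find scans plus a running minimum with a single left-to-right regex search that stops at the leftmost marker.
import Mathlib
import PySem

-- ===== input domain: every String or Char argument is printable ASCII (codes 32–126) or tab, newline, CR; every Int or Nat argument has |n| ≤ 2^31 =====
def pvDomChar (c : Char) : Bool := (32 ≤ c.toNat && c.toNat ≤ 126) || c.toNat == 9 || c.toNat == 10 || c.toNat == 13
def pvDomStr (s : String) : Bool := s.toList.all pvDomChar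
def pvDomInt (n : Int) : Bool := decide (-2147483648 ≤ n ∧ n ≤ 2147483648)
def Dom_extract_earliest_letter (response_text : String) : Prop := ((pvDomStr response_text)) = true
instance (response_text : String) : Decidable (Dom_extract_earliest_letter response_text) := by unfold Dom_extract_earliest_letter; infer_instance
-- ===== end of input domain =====

-- B replaces A's four .find scans plus a running minimum by a single left-to-right
-- scan (a regex search in Source B) stopping at the leftmost marker (idiomatic; same result).

-- ===== PORT A =====
def extract_earliest_letter (response_text : String) : String :=
  let letters : List String := ["(A)", "(B)", "(C)", "(D)"]
  let st := letters.foldl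
    (fun (st : Option String × Int) letter =>
      let idx := PySem.Str.find response_text letter
      if idx ≠ -1 ∧ idx < st.2 then (some letter, idx) else st)
    (none, PySem.Str.len response_text)
  match st.1 with
  | some l => l
  | none => "Null"

-- ===== PORT B =====
-- Source B's regex search is ported by hand (PySem has no regex): a single
-- left-to-right scan returning the first '(X)' marker; exact for this pattern.
def pvScanB : List Char → String
  | a :: b :: c :: rest =>
      if a = '(' ∧ (b = 'A' ∨ b = 'B' ∨ b = 'C' ∨ b = 'D') ∧ c = ')' then
        String.ofList [a, b, c]
      else
        pvScanB (b :: c :: rest)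
  | _ => "Null"

def extract_earliest_letter_alt (response_text : String) : String :=
  pvScanB response_text.toList

-- ===== PRECONDITION & SPEC =====
def Spec_extract_earliest_letter (response_text : String) (out : String) : Prop := out = extract_earliest_letter_alt response_text
instance (response_text : String) (out : String) : Decidable (Spec_extract_earliest_letter response_text out) := by unfold Spec_extract_earliest_letter; infer_instance

-- ===== CLAIM (what is proved, stated in full; the proofs are below) =====
def Claim_equal_extract_earliest_letter : Prop := ∀ (response_text : String), Dom_extract_earliest_letter response_text → Spec_extract_earliest_letter response_text (extract_earliest_letter response_text)

-- ===== LEMMAS AND PROOFS =====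

-- A's loop over the four concrete letters, written out as explicit state updates.
def pvStep (letter : String) (e : Int) (st : Option String × Int) : Option String × Int :=
  if e ≠ -1 ∧ e < st.2 then (some letter, e) else st

def pvA4 (e1 e2 e3 e4 n : Int) : String :=
  match (pvStep "(D)" e4 (pvStep "(C)" e3 (pvStep "(B)" e2 (pvStep "(A)" e1 (none, n))))).1 with
  | some l => l
  | none => "Null"

lemma portA_eq_A4 (s : String) :
    extract_earliest_letter s =
      pvA4 (PySem.Chars.find s.toList ['(', 'A', ')'])
           (PySem.Chars.find s.toList ['(', 'B', ')'])
           (PySem.Chars.find s.toList ['(', 'C', ')'])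
           (PySem.Chars.find s.toList ['(', 'D', ')'])
           (s.toList.length : Int) := by
  simp [extract_earliest_letter, pvA4, pvStep, List.foldl, PySem.Str.find_eq, PySem.Str.len]

-- find = n when p occurs at n and nowhere earlier
lemma find_unique (p l : List Char) (n : Nat) (hpre : p <+: l.drop n)
    (hmin : ∀ i < n, ¬ p <+: l.drop i) : PySem.Chars.find l p = (n : Int) := by
  have hin : PySem.Chars.isIn p l = true :=
    (PySem.Chars.exists_prefix_drop_iff_isIn p l).1 ⟨n, hpre⟩
  have hnn : 0 ≤ PySem.Chars.find l p :=
    (PySem.Chars.find_nonneg_iff l p).2 ((PySem.Chars.isIn_iff_infix p l).1 hin)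
  obtain ⟨h1, h2⟩ := PySem.Chars.find_spec hnn
  have hk : (PySem.Chars.find l p).toNat = n := by
    rcases lt_trichotomy (PySem.Chars.find l p).toNat n with h | h | h
    · exact absurd h1 (hmin _ h)
    · exact h
    · exact absurd hpre (h2 n h)
  omega

lemma find_eq_zero (p l : List Char) (hpre : p <+: l) : PySem.Chars.find l p = 0 := by
  have := find_unique p l 0 (by simpa using hpre) (by omega)
  simpa using this

lemma find_cons_not_prefix (p : List Char) (x : Char) (l : List Char)
    (h : ¬ p <+: (x :: l)) :
    PySem.Chars.find (x :: l) p =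
      (if PySem.Chars.find l p = -1 then -1 else PySem.Chars.find l p + 1) := by
  by_cases hl : PySem.Chars.find l p = -1
  · rw [if_pos hl, PySem.Chars.find_eq_neg_one_iff]
    intro hin
    obtain ⟨j, hj⟩ := (PySem.Chars.exists_prefix_drop_iff_isIn p (x :: l)).2
      ((PySem.Chars.isIn_iff_infix p (x :: l)).2 hin)
    cases j with
    | zero => exact h (by simpa using hj)
    | succ k =>
        have hj' : p <+: l.drop k := by simpa using hj
        exact (PySem.Chars.find_eq_neg_one_iff l p).1 hl
          (hj'.isInfix.trans (List.drop_suffix k l).isInfix)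
  · rw [if_neg hl]
    have hnn : 0 ≤ PySem.Chars.find l p := by
      have := PySem.Chars.neg_one_le_find l p; omega
    obtain ⟨h1, h2⟩ := PySem.Chars.find_spec hnn
    have := find_unique p (x :: l) ((PySem.Chars.find l p).toNat + 1)
      (by simpa using h1)
      (by
        intro i hi
        cases i with
        | zero => simpa using h
        | succ k =>
            intro hk
            exact h2 k (by omega) (by simpa using hk))
    omega

-- pattern prefix of a list with at least three elements
lemma pat_prefix_iff (X a b c : Char) (r : List Char) :
    ['(', X, ')'] <+: (a :: b :: c :: r) ↔ (a = '(' ∧ b = X ∧ c = ')') := by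
  simp [List.cons_prefix_cons, eq_comm]

-- find = -1 when the list is shorter than the pattern
lemma find_short (p l : List Char) (h : l.length < p.length) :
    PySem.Chars.find l p = -1 := by
  rw [PySem.Chars.find_eq_neg_one_iff]
  intro hin
  exact absurd hin.length_le (by omega)

lemma A4_none (n : Int) : pvA4 (-1) (-1) (-1) (-1) n = "Null" := by
  simp [pvA4, pvStep]

lemma step_pos (L : String) (e : Int) (st : Option String × Int)
    (he : -1 ≤ e) (hst : 0 ≤ st.2) : 0 ≤ (pvStep L e st).2 := by
  simp only [pvStep]
  split_ifs with h
  · simp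
    omega
  · exact hst

lemma step_shift (L : String) (e : Int) (st : Option String × Int) (he : -1 ≤ e) :
    pvStep L (if e = -1 then -1 else e + 1) (st.1, st.2 + 1) =
      ((pvStep L e st).1, (pvStep L e st).2 + 1) := by
  by_cases hneg : e = -1
  · subst hneg
    simp [pvStep]
  · rw [if_neg hneg]
    simp only [pvStep]
    by_cases hlt : e < st.2
    · rw [if_pos ⟨by omega, by omega⟩, if_pos ⟨hneg, hlt⟩]
    · rw [if_neg (by omega), if_neg (by tauto)]

lemma A4_shift (e1 e2 e3 e4 n : Int)
    (h1 : -1 ≤ e1) (h2 : -1 ≤ e2) (h3 : -1 ≤ e3) (h4 : -1 ≤ e4) (hn : 0 ≤ n) :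
    pvA4 (if e1 = -1 then -1 else e1 + 1) (if e2 = -1 then -1 else e2 + 1)
         (if e3 = -1 then -1 else e3 + 1) (if e4 = -1 then -1 else e4 + 1)
         (n + 1) = pvA4 e1 e2 e3 e4 n := by
  have p0 : (0 : Int) ≤ ((none, n) : Option String × Int).2 := hn
  have p1 := step_pos "(A)" e1 (none, n) h1 p0
  have p2 := step_pos "(B)" e2 _ h2 p1
  have p3 := step_pos "(C)" e3 _ h3 p2
  simp only [pvA4]
  rw [show ((none : Option String), n + 1) =
        (((none, n) : Option String × Int).1, ((none, n) : Option String × Int).2 + 1) from rfl,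
      step_shift "(A)" e1 (none, n) h1,
      step_shift "(B)" e2 _ h2,
      step_shift "(C)" e3 _ h3,
      step_shift "(D)" e4 _ h4]

set_option maxHeartbeats 1000000 in
lemma A4_pickA (e2 e3 e4 n : Int) (hn : 0 < n)
    (h2 : -1 ≤ e2) (h3 : -1 ≤ e3) (h4 : -1 ≤ e4) :
    pvA4 0 e2 e3 e4 n = "(A)" := by
  simp only [pvA4, pvStep]
  split_ifs <;> first | rfl | omega

set_option maxHeartbeats 1000000 in
lemma A4_pickB (e1 e3 e4 n : Int) (hn : 0 < n)
    (h1 : e1 = -1 ∨ (1 ≤ e1 ∧ e1 < n)) (h3 : -1 ≤ e3) (h4 : -1 ≤ e4) :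
    pvA4 e1 0 e3 e4 n = "(B)" := by
  simp only [pvA4, pvStep]
  split_ifs <;> first | rfl | omega

set_option maxHeartbeats 1000000 in
lemma A4_pickC (e1 e2 e4 n : Int) (hn : 0 < n)
    (h1 : e1 = -1 ∨ (1 ≤ e1 ∧ e1 < n)) (h2 : e2 = -1 ∨ (1 ≤ e2 ∧ e2 < n))
    (h4 : -1 ≤ e4) :
    pvA4 e1 e2 0 e4 n = "(C)" := by
  simp only [pvA4, pvStep]
  split_ifs <;> first | rfl | omega

set_option maxHeartbeats 1000000 in
lemma A4_pickD (e1 e2 e3 n : Int) (hn : 0 < n)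
    (h1 : e1 = -1 ∨ (1 ≤ e1 ∧ e1 < n)) (h2 : e2 = -1 ∨ (1 ≤ e2 ∧ e2 < n))
    (h3 : e3 = -1 ∨ (1 ≤ e3 ∧ e3 < n)) :
    pvA4 e1 e2 e3 0 n = "(D)" := by
  simp only [pvA4, pvStep]
  split_ifs <;> first | rfl | omega

-- a found index of a nonempty pattern is a real position: nonneg and < length
lemma find_found_bounds (p l : List Char) (hp : p ≠ []) (h : PySem.Chars.find l p ≠ -1) :
    1 ≤ PySem.Chars.find l p + 1 ∧ PySem.Chars.find l p < l.length := by
  have hnn : 0 ≤ PySem.Chars.find l p := by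
    have := PySem.Chars.neg_one_le_find l p; omega
  obtain ⟨h1, _⟩ := PySem.Chars.find_spec hnn
  have hle : PySem.Chars.find l p ≤ l.length := PySem.Chars.find_le_length l p
  constructor
  · omega
  · rcases lt_or_eq_of_le hle with h' | h'
    · exact h'
    · exfalso
      have : l.drop (PySem.Chars.find l p).toNat = [] := by
        apply List.drop_eq_nil_of_le; omega
      rw [this] at h1
      exact hp (List.prefix_nil.1 h1)

-- the "find is -1 or a position ≥ 1" disjunction used by the pick lemmas
lemma find_side (p l : List Char) (hp : p ≠ []) (h0 : PySem.Chars.find l p ≠ 0) :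
    PySem.Chars.find l p = -1 ∨
      (1 ≤ PySem.Chars.find l p ∧ PySem.Chars.find l p < (l.length : Int)) := by
  by_cases h : PySem.Chars.find l p = -1
  · exact Or.inl h
  · obtain ⟨hb1, hb2⟩ := find_found_bounds p l hp h
    exact Or.inr ⟨by omega, hb2⟩

-- if p's middle char differs from l's second char, find l p ≠ 0 (heads mismatch)
lemma find_ne_zero_of_not_prefix (p l : List Char) (h : ¬ p <+: l) :
    PySem.Chars.find l p ≠ 0 := by
  intro h0
  have hnn : 0 ≤ PySem.Chars.find l p := by omega
  obtain ⟨h1, _⟩ := PySem.Chars.find_spec hnn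
  rw [h0] at h1
  exact h (by simpa using h1)

-- main equivalence on char lists
lemma main_eq (l : List Char) :
    pvA4 (PySem.Chars.find l ['(', 'A', ')'])
         (PySem.Chars.find l ['(', 'B', ')'])
         (PySem.Chars.find l ['(', 'C', ')'])
         (PySem.Chars.find l ['(', 'D', ')'])
         (l.length : Int) = pvScanB l := by
  induction l with
  | nil =>
      rw [find_short _ _ (by simp), find_short _ _ (by simp),
          find_short _ _ (by simp), find_short _ _ (by simp)]
      simpa using A4_none 0
  | cons a t ih =>
      match t with
      | [] =>
          rw [find_short _ _ (by simp), find_short _ _ (by simp),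
              find_short _ _ (by simp), find_short _ _ (by simp)]
          simpa using A4_none 1
      | [b] =>
          rw [find_short _ _ (by simp), find_short _ _ (by simp),
              find_short _ _ (by simp), find_short _ _ (by simp)]
          simpa using A4_none 2
      | b :: c :: r =>
          by_cases hc : a = '(' ∧ (b = 'A' ∨ b = 'B' ∨ b = 'C' ∨ b = 'D') ∧ c = ')'
          · obtain ⟨ha, hb, hcc⟩ := hc
            have hscan : pvScanB (a :: b :: c :: r) = String.ofList [a, b, c] := by
              rw [pvScanB, if_pos ⟨ha, hb, hcc⟩]
            have hlen : (0 : Int) < ((a :: b :: c :: r).length : Int) := by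
              simp; omega
            rcases hb with hb | hb | hb | hb
            · subst ha hb hcc
              rw [hscan, find_eq_zero _ _ (by rw [pat_prefix_iff]; exact ⟨rfl, rfl, rfl⟩)]
              exact A4_pickA _ _ _ _ hlen (PySem.Chars.neg_one_le_find _ _)
                (PySem.Chars.neg_one_le_find _ _) (PySem.Chars.neg_one_le_find _ _)
            · subst ha hb hcc
              rw [hscan, find_eq_zero ['(', 'B', ')'] _ (by rw [pat_prefix_iff]; exact ⟨rfl, rfl, rfl⟩)]
              exact A4_pickB _ _ _ _ hlen
                (find_side _ _ (by simp) (find_ne_zero_of_not_prefix _ _ (by rw [pat_prefix_iff]; simp)))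
                (PySem.Chars.neg_one_le_find _ _) (PySem.Chars.neg_one_le_find _ _)
            · subst ha hb hcc
              rw [hscan, find_eq_zero ['(', 'C', ')'] _ (by rw [pat_prefix_iff]; exact ⟨rfl, rfl, rfl⟩)]
              exact A4_pickC _ _ _ _ hlen
                (find_side _ _ (by simp) (find_ne_zero_of_not_prefix _ _ (by rw [pat_prefix_iff]; simp)))
                (find_side _ _ (by simp) (find_ne_zero_of_not_prefix _ _ (by rw [pat_prefix_iff]; simp)))
                (PySem.Chars.neg_one_le_find _ _)
            · subst ha hb hcc
              rw [hscan, find_eq_zero ['(', 'D', ')'] _ (by rw [pat_prefix_iff]; exact ⟨rfl, rfl, rfl⟩)]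
              exact A4_pickD _ _ _ _ hlen
                (find_side _ _ (by simp) (find_ne_zero_of_not_prefix _ _ (by rw [pat_prefix_iff]; simp)))
                (find_side _ _ (by simp) (find_ne_zero_of_not_prefix _ _ (by rw [pat_prefix_iff]; simp)))
                (find_side _ _ (by simp) (find_ne_zero_of_not_prefix _ _ (by rw [pat_prefix_iff]; simp)))
          · have hscan : pvScanB (a :: b :: c :: r) = pvScanB (b :: c :: r) := by
              rw [pvScanB, if_neg hc]
            have npre : ∀ X : Char, (X = 'A' ∨ X = 'B' ∨ X = 'C' ∨ X = 'D') →
                ¬ ['(', X, ')'] <+: (a :: b :: c :: r) := by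
              intro X hX hpre
              rw [pat_prefix_iff] at hpre
              have hb' := hpre.2.1
              exact hc ⟨hpre.1, by rcases hX with h|h|h|h <;> subst h <;> simp [hb'], hpre.2.2⟩
            rw [find_cons_not_prefix _ _ _ (npre 'A' (by tauto)),
                find_cons_not_prefix _ _ _ (npre 'B' (by tauto)),
                find_cons_not_prefix _ _ _ (npre 'C' (by tauto)),
                find_cons_not_prefix _ _ _ (npre 'D' (by tauto)),
                hscan, ← ih]
            have : ((a :: b :: c :: r).length : Int) = ((b :: c :: r).length : Int) + 1 := by
              simp
            rw [this]
            exact A4_shift _ _ _ _ _ (PySem.Chars.neg_one_le_find _ _)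
              (PySem.Chars.neg_one_le_find _ _) (PySem.Chars.neg_one_le_find _ _)
              (PySem.Chars.neg_one_le_find _ _) (by positivity)

-- ===== VERDICT (by name: the statement is the Claim_ definition above) =====
theorem extract_earliest_letter_spec : Claim_equal_extract_earliest_letter := by
  intro s _
  unfold Spec_extract_earliest_letter extract_earliest_letter_alt
  rw [portA_eq_A4, main_eq]
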